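-- pv_equiv track=rewrite | github.com/nehalsinghmangat/pykal | fix_latex_proper.py | fix_latex_formatting
-- ===== SOURCE A (Python) =====
-- def fix_latex_formatting(source):
--     """
--     Fix LaTeX display math formatting for Jupyter notebooks.
--
--     Proper format:
--     - Text line ending with :\n
--     - Blank line \n
--     - Opening $$\n
--     - Math content
--     - Closing $$\n
--     - Blank line \n
--     """
--     if not source:
--         return source
--
--     # If source is a single string, split it properly
--     if len(source) == 1 and '\n' in source[0]:
--         text = source[0]
--         source = [line + '\n' for line in text.split('\n')]
--         # Remove trailing empty strings
--         while source and source[-1] == '\n':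
--             source = source[:-1]
--         if source and not source[-1].endswith('\n'):
--             source[-1] = source[-1] + '\n'
--
--     result = []
--     i = 0
--
--     while i < len(source):
--         line = source[i]
--
--         # Check if this line is opening $$
--         if line.strip() == '$$':
--             # Check if we need to add blank line before $$
--             if result and result[-1] != '\n':
--                 result.append('\n')
--
--             # Add opening $$
--             result.append('$$\n')
--             i += 1
--
--             # Collect lines until closing $$
--             math_lines = []
--             while i < len(source):
--                 line = source[i]
--                 if line.strip() == '$$':
--                     # Found closing $$
--                     # Add the math content
--                     result.extend(math_lines)
--                     # Add closing $$
--                     result.append('$$\n')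
--                     i += 1
--                     # Ensure blank line after $$
--                     if i < len(source) and source[i] != '\n':
--                         result.append('\n')
--                     break
--                 else:
--                     math_lines.append(line)
--                     i += 1
--         else:
--             result.append(line)
--             i += 1
--
--     return result
-- ===== SOURCE B (Python) =====
-- def fix_latex_formatting(source):
--     if not source:
--         return source
--
--     # If source is a single string, split it properly (kept identical to the original)
--     if len(source) == 1 and '\n' in source[0]:
--         text = source[0]
--         source = [line + '\n' for line in text.split('\n')]
--         while source and source[-1] == '\n':
--             source = source[:-1]
--         if source and not source[-1].endswith('\n'):
--             source[-1] = source[-1] + '\n'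
--
--     # Single flat pass with an in_math flag instead of a nested collection loop.
--     result = []
--     in_math = False
--     math_lines = []
--     for idx, line in enumerate(source):
--         if line.strip() == '$$':
--             if in_math:
--                 result.extend(math_lines)
--                 result.append('$$\n')
--                 math_lines = []
--                 in_math = False
--                 if idx + 1 < len(source) and source[idx + 1] != '\n':
--                     result.append('\n')
--             else:
--                 if result and result[-1] != '\n':
--                     result.append('\n')
--                 result.append('$$\n')
--                 in_math = True
--         elif in_math:
--             math_lines.append(line)
--         else:
--             result.append(line)
--     # an unclosed $$ block: buffered math lines are dropped, matching the original
--     return result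
-- ===== Notes on version B (the rewrite author's own statement) =====
-- stated objective: simpler
-- what changed: Replaces the nested index-driven while-loops (inner loop scanning ahead for the closing $$) with a single flat pass over the lines maintaining an in_math flag and a math-line buffer; the string-splitting preamble is kept unchanged.
import Mathlib
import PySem

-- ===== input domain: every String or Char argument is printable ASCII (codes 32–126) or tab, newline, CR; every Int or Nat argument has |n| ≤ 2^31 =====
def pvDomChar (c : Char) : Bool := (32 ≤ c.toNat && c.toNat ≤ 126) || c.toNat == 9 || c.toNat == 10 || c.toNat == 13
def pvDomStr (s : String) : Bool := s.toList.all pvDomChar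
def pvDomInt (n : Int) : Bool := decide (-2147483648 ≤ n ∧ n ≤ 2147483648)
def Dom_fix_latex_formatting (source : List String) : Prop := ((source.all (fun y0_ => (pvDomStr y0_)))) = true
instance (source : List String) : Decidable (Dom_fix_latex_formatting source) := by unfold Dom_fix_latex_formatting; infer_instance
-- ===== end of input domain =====

-- B replaces A's nested index-driven while-loops with one flat pass keeping an
-- in_math flag and a math-line buffer (objective: simpler); the preamble that
-- splits a single embedded-newline string is kept identical (shared helper).

-- shared preamble helper (identical code in Source A and Source B):
-- 'while source and source[-1] == "\n": source = source[:-1]'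
def pvDropTrail (xs : List String) : List String :=
  if h : xs = [] then xs
  else if xs.getLast h == "\n" then pvDropTrail xs.dropLast
  else xs
termination_by xs.length
decreasing_by
  have := List.length_pos_of_ne_nil h
  simp [List.length_dropLast]; omega

-- "if len(source) == 1 and '\n' in source[0]: …" block, identical in Source A and Source B
def pvSplitSingle (source : List String) : List String :=
  match source with
  | [s] =>
    if PySem.Str.isIn "\n" s then
      let src := ((PySem.Str.split? s "\n").getD []).map (fun l => l ++ "\n")
      let src := pvDropTrail src
      match src.getLast? with
      | some lastv =>
        if !(PySem.Str.endswith lastv "\n") then src.dropLast ++ [lastv ++ "\n"] else src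
      | none => src
    else source
  | _ => source

-- ===== PORT A =====
-- inner 'while i < len(source)' loop collecting math_lines until the closing $$;
-- returns (result, remaining lines)
def pvInnerA : List String → List String → List String → List String × List String
  | [], result, _ => (result, [])
  | line :: rs, result, mathLines =>
    if PySem.Str.strip line == "$$" then
      let r1 := result ++ mathLines ++ ["$$\n"]
      let r2 := match rs with
        | next :: _ => if next != "\n" then r1 ++ ["\n"] else r1
        | [] => r1
      (r2, rs)
    else pvInnerA rs result (mathLines ++ [line])

theorem pvInnerA_len : ∀ (l r m : List String), (pvInnerA l r m).2.length ≤ l.length := by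
  intro l
  induction l with
  | nil => intro r m; simp [pvInnerA]
  | cons line rs ih =>
    intro r m
    simp only [pvInnerA]
    split
    · simp
    · exact Nat.le_succ_of_le (ih r (m ++ [line]))

-- outer 'while i < len(source)' loop of A
def pvOuterA : List String → List String → List String
  | [], result => result
  | line :: rs, result =>
    if PySem.Str.strip line == "$$" then
      let r1 := match result.getLast? with
        | some lastv => if lastv != "\n" then result ++ ["\n"] else result
        | none => result
      let p := pvInnerA rs (r1 ++ ["$$\n"]) []
      pvOuterA p.2 p.1
    else pvOuterA rs (result ++ [line])
termination_by l _ => l.length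
decreasing_by
  · exact Nat.lt_succ_of_le (pvInnerA_len _ _ _)
  · simp

def fix_latex_formatting (source : List String) : List String :=
  if source = [] then source
  else pvOuterA (pvSplitSingle source) []

-- ===== PORT B =====
-- single flat pass: state = (result, in_math flag, buffered math_lines);
-- the Python lookahead source[idx+1] is the head of the remaining lines
def pvLoopB : List String → List String → Bool → List String → List String
  | [], result, _, _ => result
  | line :: rs, result, inMath, buf =>
    if PySem.Str.strip line == "$$" then
      if inMath then
        let r1 := result ++ buf ++ ["$$\n"]
        let r2 := match rs with
          | next :: _ => if next != "\n" then r1 ++ ["\n"] else r1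
          | [] => r1
        pvLoopB rs r2 false []
      else
        let r1 := match result.getLast? with
          | some lastv => if lastv != "\n" then result ++ ["\n"] else result
          | none => result
        pvLoopB rs (r1 ++ ["$$\n"]) true buf
    else if inMath then pvLoopB rs result true (buf ++ [line])
    else pvLoopB rs (result ++ [line]) false buf

def fix_latex_formatting_alt (source : List String) : List String :=
  if source = [] then source
  else pvLoopB (pvSplitSingle source) [] false []

-- ===== PRECONDITION & SPEC =====
def Spec_fix_latex_formatting (source : List String) (out : List String) : Prop := out = fix_latex_formatting_alt source
instance (source : List String) (out : List String) : Decidable (Spec_fix_latex_formatting source out) := by unfold Spec_fix_latex_formatting; infer_instance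

-- ===== CLAIM (what is proved, stated in full; the proofs are below) =====
def Claim_equal_fix_latex_formatting : Prop := ∀ (source : List String), Dom_fix_latex_formatting source → Spec_fix_latex_formatting source (fix_latex_formatting source)

-- ===== LEMMAS AND PROOFS =====

-- B's flat pass simulates A's two nested loops:
-- * out of math mode (with an empty buffer) it equals A's outer loop;
-- * in math mode with buffer m it equals A finishing the inner loop and continuing.
theorem pvLoop_eq : ∀ (l : List String),
    (∀ r, pvLoopB l r false [] = pvOuterA l r) ∧
    (∀ r m, pvLoopB l r true m = pvOuterA (pvInnerA l r m).2 (pvInnerA l r m).1) := by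
  intro l
  induction l with
  | nil => exact ⟨fun r => by simp [pvLoopB, pvOuterA], fun r m => by simp [pvLoopB, pvOuterA, pvInnerA]⟩
  | cons line rs ih =>
    constructor
    · intro r
      rw [pvLoopB, pvOuterA]
      split
      · exact ih.2 _ []
      · exact ih.1 _
    · intro r m
      rw [pvLoopB]
      simp only [pvInnerA]
      split
      · exact ih.1 _
      · exact ih.2 _ _

-- ===== VERDICT (by name: the statement is the Claim_ definition above) =====
theorem fix_latex_formatting_spec : Claim_equal_fix_latex_formatting := by
  unfold Claim_equal_fix_latex_formatting Spec_fix_latex_formatting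
  intro source _
  unfold fix_latex_formatting fix_latex_formatting_alt
  split
  · rfl
  · exact ((pvLoop_eq (pvSplitSingle source)).1 []).symm
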